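-- pv_equiv track=rewrite | github.com/kedarnadkarny/Python-code | CodeChef/brackets.py | max_balance
-- ===== SOURCE A (Python) =====
-- def max_balance(par):
--     max_bal = 0
--     bal = 0
--     length = len(par)
--     for i in range(0, length):
--         if par[i] == '(':
--             bal = bal + 1
--         else:
--             bal = bal - 1
--         max_bal = max(max_bal, bal)
--     return max_bal
-- ===== SOURCE B (Python) =====
-- def max_balance(par):
--     # right-to-left scan: best = max over prefixes of the remaining suffix's
--     # running balance, floored at 0; recurrence best = max(0, d + best)
--     best = 0
--     for c in reversed(par):
--         best = max(0, (1 if c == '(' else -1) + best)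
--     return best
-- ===== Notes on version B (the rewrite author's own statement) =====
-- stated objective: alternative
-- what changed: Replaces the left-to-right loop maintaining both a running balance and a running max with a right-to-left scan keeping a single accumulator best = max(0, delta + best), exploiting that the max prefix balance satisfies this suffix recurrence.
import Mathlib
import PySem

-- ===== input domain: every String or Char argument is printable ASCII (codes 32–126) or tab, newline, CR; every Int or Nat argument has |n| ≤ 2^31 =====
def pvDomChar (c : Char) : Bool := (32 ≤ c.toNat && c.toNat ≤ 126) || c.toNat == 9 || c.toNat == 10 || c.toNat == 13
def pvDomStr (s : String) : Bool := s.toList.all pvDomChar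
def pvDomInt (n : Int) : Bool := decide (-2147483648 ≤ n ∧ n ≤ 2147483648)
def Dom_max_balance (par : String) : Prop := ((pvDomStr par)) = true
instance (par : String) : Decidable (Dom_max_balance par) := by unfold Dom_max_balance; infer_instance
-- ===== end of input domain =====

-- B replaces the loop tracking (max_bal, bal) by a right-to-left scan with one accumulator; same O(n) cost.

-- ===== PORT A =====
-- one iteration of A's loop body: update bal, then max_bal
def pvStepA (st : Int × Int) (c : Char) : Int × Int :=
  let bal := if c = '(' then st.2 + 1 else st.2 - 1
  (max st.1 bal, bal)

-- forward loop over the characters carrying (max_bal, bal)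
def max_balance (par : String) : Int :=
  (par.toList.foldl pvStepA (0, 0)).1

-- ===== PORT B =====
-- right-to-left scan (Python's `for c in reversed(par)` with accumulator best = foldr)
def max_balance_alt (par : String) : Int :=
  par.toList.foldr (fun c best => max 0 ((if c = '(' then (1:Int) else -1) + best)) 0

-- ===== PRECONDITION & SPEC =====
def Spec_max_balance (par : String) (out : Int) : Prop := out = max_balance_alt par
instance (par : String) (out : Int) : Decidable (Spec_max_balance par out) := by unfold Spec_max_balance; infer_instance

-- ===== CLAIM (what is proved, stated in full; the proofs are below) =====
def Claim_equal_max_balance : Prop := ∀ (par : String), Dom_max_balance par → Spec_max_balance par (max_balance par)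

-- ===== LEMMAS AND PROOFS =====

def pvG (l : List Char) : Int :=
  l.foldr (fun c best => max 0 ((if c = '(' then (1:Int) else -1) + best)) 0

theorem pvG_nonneg (l : List Char) : 0 ≤ pvG l := by
  cases l with
  | nil => simp [pvG]
  | cons c t => exact le_max_left _ _

theorem pvG_cons (c : Char) (t : List Char) :
    pvG (c :: t) = max 0 ((if c = '(' then (1:Int) else -1) + pvG t) := rfl

theorem pvFold_fst (l : List Char) (m b : Int) (h : b ≤ m) :
    (l.foldl pvStepA (m, b)).1 = max m (b + pvG l) := by
  induction l generalizing m b with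
  | nil => simp [pvG]; omega
  | cons c t ih =>
    have hg := pvG_nonneg t
    by_cases hc : c = '('
    · rw [List.foldl_cons, show pvStepA (m, b) c = (max m (b + 1), b + 1) from by
        simp [pvStepA, hc]]
      rw [ih (max m (b + 1)) (b + 1) (le_max_right _ _)]
      rw [pvG_cons, if_pos hc]
      omega
    · rw [List.foldl_cons, show pvStepA (m, b) c = (max m (b - 1), b - 1) from by
        simp [pvStepA, hc]]
      rw [ih (max m (b - 1)) (b - 1) (le_max_right _ _)]
      rw [pvG_cons, if_neg hc]
      omega

-- ===== VERDICT (by name: the statement is the Claim_ definition above) =====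
theorem max_balance_spec : Claim_equal_max_balance := by
  intro par _
  unfold Spec_max_balance max_balance max_balance_alt
  rw [pvFold_fst _ 0 0 le_rfl]
  have := pvG_nonneg par.toList
  show max 0 (0 + pvG par.toList) = pvG par.toList
  omega
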